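-- pv_equiv track=rewrite | github.com/rchopinw/coding_exercise | quora.py | countDivBy3
-- ===== SOURCE A (Python) =====
-- def f(i, rem, s, memoize):
--     if i == len(s):
--         return 0
--     if memoize[i][rem] != -1:
--         return memoize[i][rem]
--     x = ord(s[i]) - ord('0')
--     res = ((x + rem) % 3 == 0) + f(i + 1, (x + rem) % 3, s, memoize)
--     memoize[i][rem] = res
--     return memoize[i][rem]
--
-- def countDivBy3(s):
--     n = len(s)
--     memoize = [[-1] * 3 for i in range(n)]
--     ans = 0
--     for i in range(len(s)):
--         if s[i] == '0':
--             ans += 1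
--         else:
--             ans += f(i, 0, s, memoize)
--     return ans
-- ===== SOURCE B (Python) =====
-- def countDivBy3(s):
--     ans = 0
--     for i in range(len(s)):
--         if s[i] == '0':
--             ans += 1
--         else:
--             rem = 0
--             for ch in s[i:]:
--                 rem = (rem + ord(ch) - ord('0')) % 3
--                 if rem == 0:
--                     ans += 1
--     return ans
-- ===== Notes on version B (the rewrite author's own statement) =====
-- stated objective: simpler
-- what changed: Replaces the memoized suffix recursion with a plain nested double loop keeping a running digit-sum mod 3 per start index; no memo table, no recursion.
import Mathlib
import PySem

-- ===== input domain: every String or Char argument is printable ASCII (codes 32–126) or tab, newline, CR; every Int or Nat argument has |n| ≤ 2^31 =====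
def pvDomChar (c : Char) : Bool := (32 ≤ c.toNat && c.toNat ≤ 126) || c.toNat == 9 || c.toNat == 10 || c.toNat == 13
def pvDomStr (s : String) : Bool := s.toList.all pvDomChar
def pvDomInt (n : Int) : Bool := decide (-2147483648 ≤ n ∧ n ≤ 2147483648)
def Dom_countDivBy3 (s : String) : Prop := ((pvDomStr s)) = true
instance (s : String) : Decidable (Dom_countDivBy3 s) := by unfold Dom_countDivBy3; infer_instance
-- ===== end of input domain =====

-- B replaces A's memoized suffix recursion by a plain nested double loop (running digit-sum mod 3
-- per start index): simpler, no memo table, no recursion. Same return value on every input.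

-- ===== PORT A =====
-- the memo table memoize (list of [-1,-1,-1] rows) is represented as a total function
-- Nat → Nat → Int (row index, rem index); a write is a pointwise update.
def memoUpd (m : Nat → Nat → Int) (i r : Nat) (v : Int) : Nat → Nat → Int :=
  fun i' r' => if i' = i ∧ r' = r then v else m i' r'

-- f(i, rem, s, memoize): the base test `i == len(s)` is rendered `len(s) ≤ i` (equivalent on all
-- reachable calls, where i ≤ len(s)) so that the recursion on len(s) - i terminates.
def fA (l : List Char) (m : Nat → Nat → Int) (i : Nat) (rem : Int) :
    Int × (Nat → Nat → Int) :=
  if l.length ≤ i then (0, m)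
  else if m i rem.toNat ≠ -1 then (m i rem.toNat, m)
  else
    let x : Int := (l[i]!.toNat : Int) - 48
    let r2 := PySem.Int.mod (x + rem) 3
    let (sub, m') := fA l m (i + 1) r2
    let res := (if r2 = 0 then (1 : Int) else 0) + sub
    (res, memoUpd m' i rem.toNat res)
termination_by l.length - i
decreasing_by omega

def countDivBy3 (s : String) : Int :=
  let l := s.toList
  ((List.range l.length).foldl
    (fun (st : Int × (Nat → Nat → Int)) i =>
      if l[i]! = '0' then (st.1 + 1, st.2)
      else
        let (v, m') := fA l st.2 i 0
        (st.1 + v, m'))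
    (0, fun _ _ => -1)).1

-- ===== PORT B =====
-- inner `for ch in s[i:]` is a fold over l.drop i (= the slice s[i:] for 0 ≤ i ≤ len s);
-- state = (rem, ans).
def countDivBy3_alt (s : String) : Int :=
  let l := s.toList
  (List.range l.length).foldl
    (fun ans i =>
      if l[i]! = '0' then ans + 1
      else
        ((l.drop i).foldl
          (fun (st : Int × Int) ch =>
            let rem := PySem.Int.mod (st.1 + ((ch.toNat : Int) - 48)) 3
            (rem, if rem = 0 then st.2 + 1 else st.2))
          (0, ans)).2)
    0

-- ===== PRECONDITION & SPEC =====
def Spec_countDivBy3 (s : String) (out : Int) : Prop := out = countDivBy3_alt s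
instance (s : String) (out : Int) : Decidable (Spec_countDivBy3 s out) := by unfold Spec_countDivBy3; infer_instance

-- ===== CLAIM (what is proved, stated in full; the proofs are below) =====
def Claim_equal_countDivBy3 : Prop := ∀ (s : String), Dom_countDivBy3 s → Spec_countDivBy3 s (countDivBy3 s)

-- ===== LEMMAS AND PROOFS =====

-- pure value of A's f / of B's inner scan: count of prefixes of l whose running (rem + digits) mod 3 is 0
def gpure : List Char → Int → Int
  | [], _ => 0
  | c :: t, rem =>
    let r := PySem.Int.mod (rem + ((c.toNat : Int) - 48)) 3
    (if r = 0 then 1 else 0) + gpure t r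

-- memo-table invariant: every cell is unwritten (-1) or holds the pure value
def MemoInv (l : List Char) (m : Nat → Nat → Int) : Prop :=
  ∀ i r, r < 3 → (m i r = -1 ∨ m i r = gpure (l.drop i) (r : Int))

lemma inv_upd {l : List Char} {m : Nat → Nat → Int} (hm : MemoInv l m) {i r : Nat} {v : Int}
    (hv : v = gpure (l.drop i) (r : Int)) : MemoInv l (memoUpd m i r v) := by
  intro i' r' hr'
  unfold memoUpd
  by_cases h : i' = i ∧ r' = r
  · right; simp [h, hv]
  · simp [h]; exact hm i' r' hr'

lemma fA_spec (l : List Char) : ∀ k i (m : Nat → Nat → Int) (rem : Int),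
    l.length - i ≤ k → MemoInv l m → 0 ≤ rem → rem < 3 →
    (fA l m i rem).1 = gpure (l.drop i) rem ∧ MemoInv l (fA l m i rem).2 := by
  intro k
  induction k with
  | zero =>
    intro i m rem hk hm _ _
    have hle : l.length ≤ i := by omega
    rw [fA]
    simp [hle, List.drop_eq_nil_of_le hle, gpure, hm]
  | succ k ih =>
    intro i m rem hk hm hr0 hr3
    by_cases hle : l.length ≤ i
    · rw [fA]; simp [hle, List.drop_eq_nil_of_le hle, gpure, hm]
    · have hi : i < l.length := by omega
      have hrem : ((rem.toNat : Nat) : Int) = rem := Int.toNat_of_nonneg hr0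
      have hrlt : rem.toNat < 3 := by omega
      by_cases hhit : m i rem.toNat ≠ -1
      · rw [fA]
        have := hm i rem.toNat hrlt
        rcases this with h | h
        · exact absurd h hhit
        · simp [hle, hhit]
          constructor
          · rw [h, hrem]
          · exact hm
      · -- miss: recurse
        set x : Int := (l[i]!.toNat : Int) - 48 with hx
        set r2 := PySem.Int.mod (x + rem) 3 with hr2
        have hr2low : 0 ≤ r2 := PySem.Int.mod_nonneg _ (by norm_num)
        have hr2hi : r2 < 3 := PySem.Int.mod_lt _ (by norm_num)
        have hrec := ih (i + 1) m r2 (by omega) hm hr2low hr2hi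
        have hdrop : l.drop i = l[i] :: l.drop (i + 1) := List.drop_eq_getElem_cons hi
        have hgp : gpure (l.drop i) rem
            = (if r2 = 0 then (1 : Int) else 0) + gpure (l.drop (i + 1)) r2 := by
          rw [hdrop]
          simp only [gpure]
          have hxx : (l[i]!.toNat : Int) = (l[i].toNat : Int) := by
            simp [List.getElem!_eq_getElem?_getD, List.getElem?_eq_getElem hi]
          rw [hr2, hx, hxx]
          ring_nf
        rw [fA]
        simp only [hle, hhit]
        simp only [not_not] at hhit
        simp only [hhit, ← hx, ← hr2]
        obtain ⟨h1, h2⟩ := hrec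
        simp only [if_false]
        refine ⟨?_, inv_upd h2 ?_⟩
        · simp [hgp, h1]
        · rw [hrem, hgp, h1]

lemma inner_spec (t : List Char) : ∀ (rem ans : Int),
    ((t.foldl
        (fun (st : Int × Int) ch =>
          (PySem.Int.mod (st.1 + ((ch.toNat : Int) - 48)) 3,
           if PySem.Int.mod (st.1 + ((ch.toNat : Int) - 48)) 3 = 0 then st.2 + 1 else st.2))
        (rem, ans)).2) = ans + gpure t rem := by
  induction t with
  | nil => intro rem ans; simp [gpure]
  | cons c t ih =>
    intro rem ans
    simp only [List.foldl_cons, gpure]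
    rw [ih]
    split_ifs <;> ring

lemma outer_spec (l : List Char) : ∀ (is : List Nat) (ans : Int) (m : Nat → Nat → Int),
    MemoInv l m →
    (is.foldl
      (fun (st : Int × (Nat → Nat → Int)) i =>
        if l[i]! = '0' then (st.1 + 1, st.2)
        else
          let (v, m') := fA l st.2 i 0
          (st.1 + v, m'))
      (ans, m)).1
    = is.foldl
        (fun ans i =>
          if l[i]! = '0' then ans + 1
          else
            ((l.drop i).foldl
              (fun (st : Int × Int) ch =>
                let rem := PySem.Int.mod (st.1 + ((ch.toNat : Int) - 48)) 3
                (rem, if rem = 0 then st.2 + 1 else st.2))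
              (0, ans)).2)
        ans := by
  intro is
  induction is with
  | nil => intro ans m _; rfl
  | cons i is ih =>
    intro ans m hm
    by_cases h0 : l[i]! = '0'
    · simp only [List.foldl_cons, if_pos h0]
      exact ih (ans + 1) m hm
    · have hfa := fA_spec l (l.length - i) i m 0 (le_refl _) hm (le_refl _) (by norm_num)
      simp only [List.foldl_cons, if_neg h0]
      rw [hfa.1, inner_spec]
      exact ih (ans + gpure (l.drop i) 0) (fA l m i 0).2 hfa.2

-- ===== VERDICT (by name: the statement is the Claim_ definition above) =====
theorem countDivBy3_spec : Claim_equal_countDivBy3 := by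
  intro s _
  unfold Spec_countDivBy3 countDivBy3 countDivBy3_alt
  exact outer_spec s.toList (List.range s.toList.length) 0 (fun _ _ => -1)
    (fun _ _ _ => Or.inl rfl)
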